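-- pv_equiv track=rewrite | github.com/KyriAgiak/Tromino-Tiling- | tromino_tiling.py | set_orientation
-- ===== SOURCE A (Python) =====
-- def set_orientation(square, orientation, mid):
--   for i in range(len(square)):
--     square = list(square)
--   match orientation:
--
--       case 'bottom_left':
--
--         square[mid-1][mid-1] = 'G'
--         square[mid][mid] = 'G'
--         square[mid][mid-1] = 'G'
--
--
--       case 'bottom_right':
--
--         square[mid-1][mid] = 'G'
--         square[mid][mid] = 'G'
--         square[mid][mid-1] = 'G'
--
--
--       case 'top_right':
--
--         square[mid-1][mid-1] = 'G'
--         square[mid-1][mid] = 'G'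
--         square[mid][mid] = 'G'
--
--       case 'top_left':
--
--         square[mid-1][mid] = 'G'
--         square[mid-1][mid-1] = 'G'
--         square[mid][mid-1] = 'G'
--   return square
-- ===== SOURCE B (Python) =====
-- # Complement-based re-implementation: the orientation name determines the one
-- # corner of the 2x2 block around mid that stays empty (diagonally opposite the
-- # named corner); fill the other three block cells in raster order.
-- def set_orientation(square, orientation, mid):
--     square = list(square)
--     if orientation in ('top_left', 'top_right', 'bottom_left', 'bottom_right'):
--         miss_r = mid - 1 if orientation.startswith('bottom') else mid
--         miss_c = mid - 1 if orientation.endswith('right') else mid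
--         for r in (mid - 1, mid):
--             for c in (mid - 1, mid):
--                 if (r, c) != (miss_r, miss_c):
--                     square[r][c] = 'G'
--     return square
-- ===== Notes on version B (the rewrite author's own statement) =====
-- stated objective: alternative
-- what changed: Instead of four hard-coded per-orientation assignment branches, B decodes from the orientation name the single 2x2-block corner the tromino leaves empty (diagonally opposite the named corner) and fills the complement: a raster-order double loop over the 2x2 block around mid that skips that one missing cell.
import Mathlib
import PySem

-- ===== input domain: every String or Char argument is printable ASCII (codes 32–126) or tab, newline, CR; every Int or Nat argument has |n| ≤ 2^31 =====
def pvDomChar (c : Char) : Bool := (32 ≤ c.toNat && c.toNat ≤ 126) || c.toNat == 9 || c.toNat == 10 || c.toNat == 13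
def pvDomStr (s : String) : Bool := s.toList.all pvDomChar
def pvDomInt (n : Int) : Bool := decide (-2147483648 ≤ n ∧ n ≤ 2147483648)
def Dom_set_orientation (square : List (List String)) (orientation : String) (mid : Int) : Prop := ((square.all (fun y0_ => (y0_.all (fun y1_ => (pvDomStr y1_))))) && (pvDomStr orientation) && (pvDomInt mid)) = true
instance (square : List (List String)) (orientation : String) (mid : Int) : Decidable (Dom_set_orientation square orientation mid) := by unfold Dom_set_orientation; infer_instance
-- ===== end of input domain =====

-- B decodes from the orientation name the one 2x2-block corner left empty and fills the
-- complement by a raster-order block scan (alternative decomposition); return-value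
-- equivalence only — both Pythons mutate the shared inner rows in place.


-- ===== PORT A =====
-- square[r][c] = 'G' (Python index semantics: negative wraps; out-of-range is an
-- IndexError, excluded by Pre_, here a no-op)
def aAssign (g : List (List String)) (r c : Int) : List (List String) :=
  match PySem.List.pyGet? g r with
  | some row => PySem.List.pySetD g r (PySem.List.pySetD row c "G")
  | none => g

def set_orientation (square : List (List String)) (orientation : String) (mid : Int) : List (List String) :=
  -- for i in range(len(square)): square = list(square)   (shallow copy = identity on the pure value)
  let square := (List.range square.length).foldl (fun s _ => s) square
  if orientation = "bottom_left" then
    let square := aAssign square (mid - 1) (mid - 1)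
    let square := aAssign square mid mid
    aAssign square mid (mid - 1)
  else if orientation = "bottom_right" then
    let square := aAssign square (mid - 1) mid
    let square := aAssign square mid mid
    aAssign square mid (mid - 1)
  else if orientation = "top_right" then
    let square := aAssign square (mid - 1) (mid - 1)
    let square := aAssign square (mid - 1) mid
    aAssign square mid mid
  else if orientation = "top_left" then
    let square := aAssign square (mid - 1) mid
    let square := aAssign square (mid - 1) (mid - 1)
    aAssign square mid (mid - 1)
  else square

-- ===== PORT B =====
-- square[r][c] = 'G' for B's loop body (same Python semantics as in A's port)
def bSetCell (g : List (List String)) (r c : Int) : List (List String) :=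
  PySem.List.pySetD g r (PySem.List.pySetD (PySem.List.pyGetD g r []) c "G")

def set_orientation_alt (square : List (List String)) (orientation : String) (mid : Int) : List (List String) :=
  -- square = list(square)  (shallow copy = identity on the pure value)
  if orientation ∈ ["top_left", "top_right", "bottom_left", "bottom_right"] then
    let missR := if PySem.Str.startswith orientation "bottom" then mid - 1 else mid
    let missC := if PySem.Str.endswith orientation "right" then mid - 1 else mid
    [mid - 1, mid].foldl (fun g r =>
      [mid - 1, mid].foldl (fun g c =>
        if (r, c) ≠ (missR, missC) then bSetCell g r c else g) g) square
  else square

-- ===== PRECONDITION & SPEC =====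
-- the three cells each orientation writes (for Pre_ only)
def pvCells (orientation : String) (mid : Int) : List (Int × Int) :=
  if orientation = "bottom_left" then [(mid - 1, mid - 1), (mid, mid), (mid, mid - 1)]
  else if orientation = "bottom_right" then [(mid - 1, mid), (mid, mid), (mid, mid - 1)]
  else if orientation = "top_right" then [(mid - 1, mid - 1), (mid - 1, mid), (mid, mid)]
  else if orientation = "top_left" then [(mid - 1, mid), (mid - 1, mid - 1), (mid, mid - 1)]
  else []

-- Pre_ excludes exactly the inputs where Python A raises IndexError: a written
-- row or column index out of range for the grid.
def Pre_set_orientation (square : List (List String)) (orientation : String) (mid : Int) : Prop :=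
  ((pvCells orientation mid).all (fun p =>
    match PySem.List.pyGet? square p.1 with
    | some row => (PySem.List.pyGet? row p.2).isSome
    | none => false)) = true
instance (square : List (List String)) (orientation : String) (mid : Int) : Decidable (Pre_set_orientation square orientation mid) := by unfold Pre_set_orientation; infer_instance

def pvWitness_set_orientation : List (List String) × String × Int :=
  ([["W", "W"], ["W", "W"]], "top_left", 1)

def Spec_set_orientation (square : List (List String)) (orientation : String) (mid : Int) (out : List (List String)) : Prop := out = set_orientation_alt square orientation mid
instance (square : List (List String)) (orientation : String) (mid : Int) (out : List (List String)) : Decidable (Spec_set_orientation square orientation mid out) := by unfold Spec_set_orientation; infer_instance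

-- ===== CLAIM (what is proved, stated in full; the proofs are below) =====
def Claim_equal_set_orientation : Prop := ∀ (square : List (List String)) (orientation : String) (mid : Int), Dom_set_orientation square orientation mid → Pre_set_orientation square orientation mid → Spec_set_orientation square orientation mid (set_orientation square orientation mid)


-- ===== LEMMAS AND PROOFS =====
theorem foldl_id (l : List Nat) (a : List (List String)) :
    l.foldl (fun s _ => s) a = a := by
  induction l <;> simp_all [List.foldl]

theorem bSetCell_eq_aAssign (g : List (List String)) (r c : Int) :
    bSetCell g r c = aAssign g r c := by
  unfold bSetCell aAssign
  cases h : PySem.List.pyGet? g r with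
  | some row =>
    simp [PySem.List.pyGetD, h]
  | none =>
    have : ¬ PySem.Raise.InRange g.length r := (PySem.List.pyGet?_eq_none_iff g r).mp h
    simp [(PySem.List.pySet?_eq_none_iff _ _ _).mpr this, PySem.List.pySetD]

theorem pyIdx?_lt (n : Nat) (i : Int) (k : Nat) (h : PySem.List.pyIdx? n i = some k) : k < n := by
  unfold PySem.List.pyIdx? at h
  split_ifs at h <;> simp_all <;> omega

theorem pySetD_none {a : Type} (xs : List a) (c : Int) (v : a)
    (h : PySem.List.pyIdx? xs.length c = none) : PySem.List.pySetD xs c v = xs := by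
  simp [PySem.List.pySetD, PySem.List.pySet?, h]

theorem pySetD_some {a : Type} (xs : List a) (c : Int) (v : a) (k : Nat)
    (h : PySem.List.pyIdx? xs.length c = some k) : PySem.List.pySetD xs c v = xs.set k v := by
  simp [PySem.List.pySetD, PySem.List.pySet?, h]

-- setting the same value twice in one row commutes
theorem pySetD_comm_same (row : List String) (c1 c2 : Int) (v : String) :
    PySem.List.pySetD (PySem.List.pySetD row c1 v) c2 v
      = PySem.List.pySetD (PySem.List.pySetD row c2 v) c1 v := by
  rcases h1 : PySem.List.pyIdx? row.length c1 with _ | k1 <;>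
  rcases h2 : PySem.List.pyIdx? row.length c2 with _ | k2
  · rw [pySetD_none _ _ _ h1, pySetD_none _ _ _ h2, pySetD_none _ _ _ h1]
  · rw [pySetD_none _ _ _ h1, pySetD_some _ _ _ _ h2, pySetD_none _ _ _ (by simpa using h1)]
  · rw [pySetD_some _ _ _ _ h1, pySetD_none _ _ _ h2, pySetD_some _ _ _ _ h1,
        pySetD_none _ _ _ (show PySem.List.pyIdx? (row.set k1 v).length c2 = none by simpa using h2)]
  · rw [pySetD_some _ _ _ _ h1, pySetD_some _ _ _ _ h2,
        pySetD_some _ _ _ _ (show PySem.List.pyIdx? (row.set k1 v).length c2 = some k2 by simpa using h2),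
        pySetD_some _ _ _ _ (show PySem.List.pyIdx? (row.set k2 v).length c1 = some k1 by simpa using h1)]
    by_cases hk : k1 = k2
    · subst hk; simp [List.set_set]
    · exact List.set_comm _ _ hk

-- two writes of 'G' into the same row index commute
theorem aAssign_swap (g : List (List String)) (r c1 c2 : Int) :
    aAssign (aAssign g r c1) r c2 = aAssign (aAssign g r c2) r c1 := by
  cases hi : PySem.List.pyIdx? g.length r with
  | none =>
    have hg : PySem.List.pyGet? g r = none := by simp [PySem.List.pyGet?, hi]
    simp [aAssign, hg]
  | some k =>
    have hk : k < g.length := pyIdx?_lt _ _ _ hi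
    have hg : PySem.List.pyGet? g r = some g[k] := by
      simp [PySem.List.pyGet?, hi, List.getElem?_eq_getElem hk]
    have hset : ∀ x : List String, PySem.List.pySetD g r x = g.set k x := by
      intro x; simp [PySem.List.pySetD, PySem.List.pySet?, hi]
    have step : ∀ c : Int, aAssign g r c = g.set k (PySem.List.pySetD g[k] c "G") := by
      intro c; simp [aAssign, hg, hset]
    have step2 : ∀ (A : List String) (c : Int),
        aAssign (g.set k A) r c = g.set k (PySem.List.pySetD A c "G") := by
      intro A c
      have hg' : PySem.List.pyGet? (g.set k A) r = some A := by
        simp [PySem.List.pyGet?, List.getElem?_set, hi, hk]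
      have hset' : ∀ x : List String, PySem.List.pySetD (g.set k A) r x = g.set k x := by
        intro x; simp [PySem.List.pySetD, PySem.List.pySet?, hi, List.set_set]
      simp [aAssign, hg', hset']
    rw [step c1, step c2, step2, step2, pySetD_comm_same]

theorem alt_bl (square : List (List String)) (mid : Int) :
    set_orientation_alt square "bottom_left" mid
      = aAssign (aAssign (aAssign square (mid-1) (mid-1)) mid mid) mid (mid-1) := by
  have hne : (mid : Int) - 1 ≠ mid := by omega
  have hs : PySem.Str.startswith "bottom_left" "bottom" = true := by decide
  have he : PySem.Str.endswith "bottom_left" "right" = false := by decide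
  rw [aAssign_swap _ mid mid (mid-1)]
  unfold set_orientation_alt
  rw [hs, he]
  simp [List.foldl, hne, Ne.symm hne, bSetCell_eq_aAssign]

theorem alt_br (square : List (List String)) (mid : Int) :
    set_orientation_alt square "bottom_right" mid
      = aAssign (aAssign (aAssign square (mid-1) mid) mid mid) mid (mid-1) := by
  have hne : (mid : Int) - 1 ≠ mid := by omega
  have hs : PySem.Str.startswith "bottom_right" "bottom" = true := by decide
  have he : PySem.Str.endswith "bottom_right" "right" = true := by decide
  rw [aAssign_swap _ mid mid (mid-1)]
  unfold set_orientation_alt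
  rw [hs, he]
  simp [List.foldl, Ne.symm hne, bSetCell_eq_aAssign]

theorem alt_tr (square : List (List String)) (mid : Int) :
    set_orientation_alt square "top_right" mid
      = aAssign (aAssign (aAssign square (mid-1) (mid-1)) (mid-1) mid) mid mid := by
  have hne : (mid : Int) - 1 ≠ mid := by omega
  have hs : PySem.Str.startswith "top_right" "bottom" = false := by decide
  have he : PySem.Str.endswith "top_right" "right" = true := by decide
  unfold set_orientation_alt
  rw [hs, he]
  simp [List.foldl, hne, Ne.symm hne, bSetCell_eq_aAssign]

theorem alt_tl (square : List (List String)) (mid : Int) :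
    set_orientation_alt square "top_left" mid
      = aAssign (aAssign (aAssign square (mid-1) mid) (mid-1) (mid-1)) mid (mid-1) := by
  have hne : (mid : Int) - 1 ≠ mid := by omega
  have hs : PySem.Str.startswith "top_left" "bottom" = false := by decide
  have he : PySem.Str.endswith "top_left" "right" = false := by decide
  rw [aAssign_swap _ (mid-1) mid (mid-1)]
  unfold set_orientation_alt
  rw [hs, he]
  simp [List.foldl, hne, bSetCell_eq_aAssign]

-- ===== VERDICT (by name: the statement is the Claim_ definition above) =====
theorem set_orientation_spec : Claim_equal_set_orientation := by
  intro square orientation mid _ _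
  unfold Spec_set_orientation set_orientation
  rw [foldl_id]
  by_cases h1 : orientation = "bottom_left"
  · subst h1; rw [alt_bl]; simp
  by_cases h2 : orientation = "bottom_right"
  · subst h2; rw [alt_br]; simp
  by_cases h3 : orientation = "top_right"
  · subst h3; rw [alt_tr]; simp
  by_cases h4 : orientation = "top_left"
  · subst h4; rw [alt_tl]; simp
  · simp [set_orientation_alt, h1, h2, h3, h4]
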